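-- pv_equiv track=rewrite | github.com/adhrit2019/thinkcspy3-answer-keys | Chapter 11/vectors.py | cross_product
-- ===== SOURCE A (Python) =====
-- def cross_product(u, v):
--     """Returns the cross product of u and v."""
--
--     if len(u) == len(v) and len(u) == 3:
--         res = []
--         for num in range(len(u)):
--             if num == 0:
--                 matrix_u = u[1:]
--                 matrix_v = v[1:]
--             elif num == 1:
--                 matrix_u = [u[0]] + [u[2]]
--                 matrix_v = [v[0]] + [v[2]]
--             elif num == 2:
--                 matrix_u = u[:2]
--                 matrix_v = v[:2]
--
--             matrix_v.reverse()
--             com = 0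
--
--             for i in range(len(matrix_u)):
--                 com = (matrix_u[i] * matrix_v[i]) - com
--
--             if num == 0 or num == 2:
--                 com *= -1
--
--             res.append(com)
--
--         return res
-- ===== SOURCE B (Python) =====
-- def cross_product(u, v):
--     """Returns the cross product of u and v."""
--     if len(u) == len(v) and len(u) == 3:
--         a, b, c = u
--         d, e, f = v
--         return [b * f - c * e, c * d - a * f, a * e - b * d]
-- ===== Notes on version B (the rewrite author's own statement) =====
-- stated objective: simpler
-- what changed: Replaces the loop that builds 2x2 sub-vectors, reverses, folds a running determinant and flips signs with a direct unpacking of the two 3-vectors and the three closed-form determinant components.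
import Mathlib
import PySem

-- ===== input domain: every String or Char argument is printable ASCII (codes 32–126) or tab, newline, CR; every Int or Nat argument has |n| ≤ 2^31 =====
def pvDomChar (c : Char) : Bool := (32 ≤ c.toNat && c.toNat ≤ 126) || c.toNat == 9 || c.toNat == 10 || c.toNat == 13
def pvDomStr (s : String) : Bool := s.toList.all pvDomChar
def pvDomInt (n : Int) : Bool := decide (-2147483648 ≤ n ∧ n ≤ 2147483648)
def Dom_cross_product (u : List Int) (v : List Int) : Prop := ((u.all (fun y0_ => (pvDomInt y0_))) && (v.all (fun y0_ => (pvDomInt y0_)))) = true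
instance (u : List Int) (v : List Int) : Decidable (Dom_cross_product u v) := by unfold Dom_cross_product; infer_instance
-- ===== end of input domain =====

-- B replaces A's sub-vector/reverse/fold/sign-flip loop with the three closed-form determinant components (objective: simpler).

-- ===== PORT A =====
-- literal transliteration of A: the range(3) loop builds matrix_u/matrix_v per index,
-- reverses matrix_v, folds the running 'com', flips the sign for components 0 and 2.
def cross_product (u : List Int) (v : List Int) : Option (List Int) :=
  if u.length == v.length && u.length == 3 then
    some ((PySem.List.pyRange 0 3 1).foldl (fun res num =>
      let mu : List Int :=
        if num == 0 then PySem.List.slice u (some 1) none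
        else if num == 1 then [PySem.List.pyGetD u 0 0] ++ [PySem.List.pyGetD u 2 0]
        else PySem.List.slice u none (some 2)
      let mv : List Int :=
        if num == 0 then PySem.List.slice v (some 1) none
        else if num == 1 then [PySem.List.pyGetD v 0 0] ++ [PySem.List.pyGetD v 2 0]
        else PySem.List.slice v none (some 2)
      let mv := mv.reverse
      let com : Int := (PySem.List.pyRange 0 mu.length 1).foldl
        (fun com i => PySem.List.pyGetD mu i 0 * PySem.List.pyGetD mv i 0 - com) 0
      let com := if num == 0 || num == 2 then com * (-1) else com
      res ++ [com]) [])
  else none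

-- ===== PORT B =====
def cross_product_alt (u : List Int) (v : List Int) : Option (List Int) :=
  match u, v with
  | [a, b, c], [d, e, f] => some [b * f - c * e, c * d - a * f, a * e - b * d]
  | _, _ => none

-- ===== PRECONDITION & SPEC =====
def Spec_cross_product (u : List Int) (v : List Int) (out : Option (List Int)) : Prop := out = cross_product_alt u v
instance (u : List Int) (v : List Int) (out : Option (List Int)) : Decidable (Spec_cross_product u v out) := by unfold Spec_cross_product; infer_instance

-- ===== CLAIM (what is proved, stated in full; the proofs are below) =====
def Claim_equal_cross_product : Prop := ∀ (u : List Int) (v : List Int), Dom_cross_product u v → Spec_cross_product u v (cross_product u v)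

-- ===== LEMMAS AND PROOFS =====

-- ===== VERDICT (by name: the statement is the Claim_ definition above) =====
theorem cross_product_spec : Claim_equal_cross_product := by
  intro u v _
  unfold Spec_cross_product cross_product cross_product_alt
  match u, v with
  | [a, b, c], [d, e, f] =>
    simp [PySem.List.pyRange, PySem.List.slice,
      PySem.List.pyGetD, PySem.List.pyGet?, PySem.List.pyIdx?, PySem.List.clampIdx, List.range_succ]
  | [], _ | [_], _ | [_,_], _ | (_::_::_::_::_), _ => simp
  | [a,b,c], [] | [a,b,c], [_] | [a,b,c], [_,_] | [a,b,c], (_::_::_::_::_) => simp
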